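-- pv_equiv track=rewrite | github.com/joaovitor101/teste123 | mrt/knockout.py | minimo_jogadores
-- ===== SOURCE A (Python) =====
-- MOD = 10**9 + 7
--
-- def minimo_jogadores(A, B):
--     # vamos calcular o expoente mínimo E tal que N = 2^E funciona
--
--     # E será o máximo, sobre todos os estados possíveis (v,d),
--     # de (rodadas até aqui) - v2(binomial)   <-- (Kummer)
--
--     E = 0
--     for k in range(A+B-1):  # rodada k (0 até A+B-2)
--         # intervalo de vitórias possíveis até aqui
--         L = max(0, k - (B - 1))
--         R = min(k, A - 1)
--         if L > R:
--             continue
--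
--         # checamos o mínimo expoente 2-adic de C(k,v) para v no intervalo
--         v2min = None
--         for v in range(L, R+1):
--             # Kummer: v2(C(k,v)) = nº de carries ao somar v e k-v em base 2
--             carries = (v & (k - v)).bit_count()
--             if v2min is None or carries < v2min:
--                 v2min = carries
--
--         E = max(E, (k+1) - v2min)
--
--     return pow(2, E, MOD)
-- ===== SOURCE B (Python) =====
-- MOD = 10**9 + 7
--
-- def minimo_jogadores(A, B):
--     # Closed form: the maximum of (k+1) - min_v v2(C(k,v)) over all rounds is
--     # attained at the last round with v = A-1, d = B-1, because
--     # f(v,d) = v + d - popcount(v & d) is monotone in each argument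
--     # (increasing d by 1 raises popcount(v & d) by at most 1).
--     if A >= 1 and B >= 1:
--         E = A + B - 1 - ((A - 1) & (B - 1)).bit_count()
--     else:
--         E = 0
--     return pow(2, E, MOD)
-- ===== Notes on version B (the rewrite author's own statement) =====
-- stated objective: faster
-- what changed: Replaces the double loop over rounds k and wins v (min 2-adic valuation per round, then max over rounds) by a proved closed form: E = A+B-1 - popcount((A-1)&(B-1)) for A,B >= 1 and E = 0 otherwise, justified by monotonicity of v+d-popcount(v&d) in each argument.
import Mathlib
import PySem

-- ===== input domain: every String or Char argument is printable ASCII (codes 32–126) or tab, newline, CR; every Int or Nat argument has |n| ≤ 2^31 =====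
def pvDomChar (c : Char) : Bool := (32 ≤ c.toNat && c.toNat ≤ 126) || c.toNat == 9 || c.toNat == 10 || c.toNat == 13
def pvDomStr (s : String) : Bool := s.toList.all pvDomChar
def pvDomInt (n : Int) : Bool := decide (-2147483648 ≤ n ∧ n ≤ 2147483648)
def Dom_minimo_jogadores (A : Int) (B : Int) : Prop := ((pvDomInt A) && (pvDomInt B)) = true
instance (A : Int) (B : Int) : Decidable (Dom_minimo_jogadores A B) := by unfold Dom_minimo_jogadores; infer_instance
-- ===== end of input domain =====

-- B replaces A's double loop by a proved closed form for the exponent (objective: faster).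

-- ===== PORT A =====
-- literal port of A's double loop: outer fold over rounds k, inner fold computing
-- the minimum over v of (v & (k - v)).bit_count(), then pow(2, E, 10**9+7)
def minimo_jogadores (A : Int) (B : Int) : Int :=
  let E : Int := (PySem.List.pyRange 0 (A + B - 1) 1).foldl (fun E k =>
    let L : Int := max 0 (k - (B - 1))
    let R : Int := min k (A - 1)
    if L > R then E
    else
      let v2min : Option Int := (PySem.List.pyRange L (R + 1) 1).foldl (fun v2min v =>
        let carries : Int := (PySem.Int.bitCount (PySem.Int.band v (k - v)) : Int)
        match v2min with
        | none => some carries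
        | some m => if carries < m then some carries else v2min) none
      match v2min with
      | none => E   -- unreachable: the inner range is nonempty when L ≤ R
      | some m => max E (k + 1 - m)) 0
  PySem.Int.powMod 2 E.toNat 1000000007

-- ===== PORT B =====
-- literal port of Source B: closed form for the exponent
def minimo_jogadores_alt (A : Int) (B : Int) : Int :=
  let E : Int := if 1 ≤ A ∧ 1 ≤ B
    then A + B - 1 - (PySem.Int.bitCount (PySem.Int.band (A - 1) (B - 1)) : Int)
    else 0
  PySem.Int.powMod 2 E.toNat 1000000007

-- ===== PRECONDITION & SPEC =====
def Spec_minimo_jogadores (A : Int) (B : Int) (out : Int) : Prop := out = minimo_jogadores_alt A B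
instance (A : Int) (B : Int) (out : Int) : Decidable (Spec_minimo_jogadores A B out) := by unfold Spec_minimo_jogadores; infer_instance

-- ===== CLAIM (what is proved, stated in full; the proofs are below) =====
def Claim_equal_minimo_jogadores : Prop := ∀ (A : Int) (B : Int), Dom_minimo_jogadores A B → Spec_minimo_jogadores A B (minimo_jogadores A B)

-- ===== LEMMAS AND PROOFS =====

-- popcount of a natural number, as PySem's bitCount
def pvS (m : Nat) : Nat := PySem.Int.bitCount (m : Int)

theorem pvS_zero : pvS 0 = 0 := PySem.Int.bitCount_zero

theorem pvS_rec (m : Nat) (h : 0 < m) : pvS m = m % 2 + pvS (m / 2) :=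
  PySem.Int.bitCount_natCast h

theorem and_mod_two (a b : Nat) : (a &&& b) % 2 = a % 2 * (b % 2) := by
  have h := Nat.and_mod_two_eq_one (a := a) (b := b)
  have h3 : (a &&& b) % 2 = 0 ∨ (a &&& b) % 2 = 1 := Nat.mod_two_eq_zero_or_one _
  rcases h3 with h0 | h0
  · rcases Nat.mod_two_eq_zero_or_one a with h1 | h1 <;> rcases Nat.mod_two_eq_zero_or_one b with h2 | h2 <;>
      rw [h0, h1, h2]
    exact absurd (h.mpr ⟨h1, h2⟩) (by omega)
  · obtain ⟨h1, h2⟩ := h.mp h0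
    rw [h0, h1, h2]

theorem pvS_and (x y : Nat) : pvS (x &&& y) = x % 2 * (y % 2) + pvS (x / 2 &&& y / 2) := by
  by_cases h : x &&& y = 0
  · have h1 : x % 2 * (y % 2) = 0 := by rw [← and_mod_two, h]
    have h2 : x / 2 &&& y / 2 = 0 := by rw [← Nat.and_div_two, h]
    rw [h, h1, h2, pvS_zero]
  · rw [pvS_rec _ (Nat.pos_of_ne_zero h), and_mod_two, Nat.and_div_two]

theorem pvS_le (m : Nat) : pvS m ≤ m := by
  induction m using Nat.strong_induction_on with
  | _ m ih =>
    rcases Nat.eq_zero_or_pos m with h | h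
    · simp [h, pvS_zero]
    · have := ih (m / 2) (by omega)
      rw [pvS_rec m h]; omega

-- Key step: raising the second operand by one raises popcount of the AND by at most one.
theorem pvS_and_succ (d v : Nat) : pvS (v &&& (d + 1)) ≤ pvS (v &&& d) + 1 := by
  induction d using Nat.strong_induction_on generalizing v with
  | _ d ih =>
    rcases Nat.mod_two_eq_zero_or_one d with hd | hd
    · have h1 : (d + 1) % 2 = 1 := by omega
      have h2 : (d + 1) / 2 = d / 2 := by omega
      rw [pvS_and v (d + 1), pvS_and v d, h1, h2, hd]
      have hv := Nat.mod_two_eq_zero_or_one v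
      omega
    · have h1 : (d + 1) % 2 = 0 := by omega
      have h2 : (d + 1) / 2 = d / 2 + 1 := by omega
      rw [pvS_and v (d + 1), pvS_and v d, h1, h2, hd]
      have := ih (d / 2) (by omega) (v / 2)
      have hv := Nat.mod_two_eq_zero_or_one v
      omega

theorem pv_mono_right (v : Nat) {d b : Nat} (h : d ≤ b) :
    (d : Int) - pvS (v &&& d) ≤ (b : Int) - pvS (v &&& b) := by
  induction b, h using Nat.le_induction with
  | base => exact le_refl _
  | succ b hb ih =>
    have := pvS_and_succ b v
    push_cast at ih ⊢
    omega

-- monotonicity in both arguments: the pair (a, b) dominates every (v, d) below it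
theorem pv_pair_le (v d a b : Nat) (hv : v ≤ a) (hd : d ≤ b) :
    (v : Int) + d - pvS (v &&& d) ≤ (a : Int) + b - pvS (a &&& b) := by
  have h1 := pv_mono_right v hd
  have h2 := pv_mono_right b hv
  rw [Nat.land_comm b v, Nat.land_comm b a] at h2
  omega

-- ---- generic fold lemmas ----

theorem pv_foldl_le {α : Type} (f : Int → α → Int) (bound : Int) :
    ∀ (l : List α) (E0 : Int), E0 ≤ bound → (∀ E x, x ∈ l → E ≤ bound → f E x ≤ bound) →
      l.foldl f E0 ≤ bound := by
  intro l
  induction l with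
  | nil => intro E0 h _; simpa using h
  | cons x xs ih =>
    intro E0 h hs
    exact ih _ (hs E0 x (by simp) h) (fun E y hy hE => hs E y (by simp [hy]) hE)

theorem pv_foldl_ge {α : Type} (f : Int → α → Int) (hmono : ∀ E x, E ≤ f E x) :
    ∀ (l : List α) (E0 : Int), E0 ≤ l.foldl f E0 := by
  intro l
  induction l with
  | nil => intro E0; simp
  | cons x xs ih => intro E0; exact le_trans (hmono E0 x) (ih (f E0 x))

theorem pv_foldl_ge_of_mem {α : Type} (f : Int → α → Int) (hmono : ∀ E x, E ≤ f E x)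
    (c : Int) (k : α) (hk : ∀ E, c ≤ f E k) :
    ∀ (l : List α) (E0 : Int), k ∈ l → c ≤ l.foldl f E0 := by
  intro l
  induction l with
  | nil => intro E0 h; simp at h
  | cons x xs ih =>
    intro E0 h
    rcases List.mem_cons.mp h with h | h
    · subst h
      exact le_trans (hk E0) (pv_foldl_ge f hmono xs (f E0 k))
    · exact ih (f E0 x) h

theorem pv_foldl_id {α : Type} (f : Int → α → Int) :
    ∀ (l : List α) (E0 : Int), (∀ E x, x ∈ l → f E x = E) → l.foldl f E0 = E0 := by
  intro l
  induction l with
  | nil => intro E0 _; simp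
  | cons x xs ih =>
    intro E0 h
    have := h E0 x (by simp)
    simp only [List.foldl, this]
    exact ih E0 (fun E y hy => h E y (by simp [hy]))

-- the inner minimum fold, abstracted over the scored function c
theorem pv_minfold_mem (c : Int → Int) :
    ∀ (l : List Int) (o : Option Int) (m : Int),
      l.foldl (fun o v => match o with
        | none => some (c v)
        | some m0 => if c v < m0 then some (c v) else o) o = some m →
      (∃ v ∈ l, m = c v) ∨ o = some m := by
  intro l
  induction l with
  | nil => intro o m h; right; simpa using h
  | cons x xs ih =>
    intro o m h
    simp only [List.foldl] at h
    rcases ih _ m h with ⟨v, hv, hm⟩ | ho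
    · exact Or.inl ⟨v, by simp [hv], hm⟩
    · cases o with
      | none =>
        left
        refine ⟨x, by simp, ?_⟩
        simpa using ho.symm
      | some m0 =>
        by_cases hcx : c x < m0
        · simp only [hcx, if_true, Option.some.injEq] at ho
          exact Or.inl ⟨x, by simp, ho.symm⟩
        · simp only [hcx, if_false] at ho
          exact Or.inr ho

-- the outer loop body of A, named for the proofs
def pvStep (A B : Int) (E k : Int) : Int :=
  if max 0 (k - (B - 1)) > min k (A - 1) then E
  else
    match (PySem.List.pyRange (max 0 (k - (B - 1))) (min k (A - 1) + 1) 1).foldl (fun v2min v =>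
      match v2min with
      | none => some ((PySem.Int.bitCount (PySem.Int.band v (k - v)) : Int))
      | some m => if ((PySem.Int.bitCount (PySem.Int.band v (k - v)) : Int)) < m
                  then some ((PySem.Int.bitCount (PySem.Int.band v (k - v)) : Int))
                  else v2min) none with
    | none => E
    | some m => max E (k + 1 - m)

theorem pvStep_mono (A B : Int) : ∀ (E k : Int), E ≤ pvStep A B E k := by
  intro E k
  unfold pvStep
  split_ifs with h
  · exact le_refl _
  · cases hfold : (PySem.List.pyRange (max 0 (k - (B - 1))) (min k (A - 1) + 1) 1).foldl
      (fun v2min v =>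
        match v2min with
        | none => some ((PySem.Int.bitCount (PySem.Int.band v (k - v)) : Int))
        | some m => if ((PySem.Int.bitCount (PySem.Int.band v (k - v)) : Int)) < m
                    then some ((PySem.Int.bitCount (PySem.Int.band v (k - v)) : Int))
                    else v2min) none with
    | none => exact le_refl _
    | some m => exact le_max_left _ _

-- the exponent B computes
def pvEB (A B : Int) : Int :=
  if 1 ≤ A ∧ 1 ≤ B
  then A + B - 1 - (PySem.Int.bitCount (PySem.Int.band (A - 1) (B - 1)) : Int)
  else 0

theorem pvEB_nonneg (A B : Int) : 0 ≤ pvEB A B := by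
  unfold pvEB
  split_ifs with h
  · obtain ⟨hA, hB⟩ := h
    rw [PySem.Int.band_of_nonneg (by omega) (by omega)]
    have h1 : ((A - 1).toNat &&& (B - 1).toNat) ≤ (B - 1).toNat := Nat.and_le_right
    have h2 := pvS_le ((A - 1).toNat &&& (B - 1).toNat)
    have h3 : ((B - 1).toNat : Int) = B - 1 := by omega
    unfold pvS at h2
    omega
  · exact le_refl _

-- every candidate produced by a round is at most pvEB
theorem pvStep_le (A B : Int) (bound : Int) (hb : pvEB A B ≤ bound) :
    ∀ (E k : Int), 0 ≤ k → E ≤ bound → pvStep A B E k ≤ bound := by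
  intro E k hk hE
  unfold pvStep
  split_ifs with h
  · exact hE
  · push Not at h
    cases hfold : (PySem.List.pyRange (max 0 (k - (B - 1))) (min k (A - 1) + 1) 1).foldl
      (fun v2min v =>
        match v2min with
        | none => some ((PySem.Int.bitCount (PySem.Int.band v (k - v)) : Int))
        | some m => if ((PySem.Int.bitCount (PySem.Int.band v (k - v)) : Int)) < m
                    then some ((PySem.Int.bitCount (PySem.Int.band v (k - v)) : Int))
                    else v2min) none with
    | none => exact hE
    | some m =>
      rcases pv_minfold_mem (fun v => (PySem.Int.bitCount (PySem.Int.band v (k - v)) : Int))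
        _ none m hfold with ⟨v, hv, hm⟩ | ho
      · rw [PySem.List.mem_pyRange_one] at hv
        -- bounds on v and k - v
        have hv0 : 0 ≤ v := le_trans (le_max_left _ _) hv.1
        have hvA : v ≤ A - 1 := le_trans (by omega) (min_le_right k (A - 1))
        have hkv0 : 0 ≤ k - v := by
          have := min_le_left k (A - 1); omega
        have hkvB : k - v ≤ B - 1 := by
          have := le_max_right 0 (k - (B - 1)); have := hv.1; omega
        have hA : 1 ≤ A := by omega
        have hB : 1 ≤ B := by omega
        have key := pv_pair_le v.toNat (k - v).toNat (A - 1).toNat (B - 1).toNat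
          (by omega) (by omega)
        have e1 : PySem.Int.band v (k - v) = ((v.toNat &&& (k - v).toNat : Nat) : Int) :=
          PySem.Int.band_of_nonneg hv0 hkv0
        have e2 : PySem.Int.band (A - 1) (B - 1) = (((A - 1).toNat &&& (B - 1).toNat : Nat) : Int) :=
          PySem.Int.band_of_nonneg (by omega) (by omega)
        have hbound : bound ≥ A + B - 1 - (PySem.Int.bitCount ((((A - 1).toNat &&& (B - 1).toNat) : Nat) : Int) : Int) := by
          unfold pvEB at hb
          rw [if_pos ⟨hA, hB⟩, e2] at hb
          exact le_trans (le_of_eq rfl) hb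
        rw [hm, e1]
        have c1 : (v.toNat : Int) = v := by omega
        have c2 : ((k - v).toNat : Int) = k - v := by omega
        have c3 : ((A - 1).toNat : Int) = A - 1 := by omega
        have c4 : ((B - 1).toNat : Int) = B - 1 := by omega
        unfold pvS at key
        simp only [max_le_iff]
        constructor
        · exact hE
        · omega
      · exact absurd ho (by simp)

-- the final round produces exactly pvEB when A, B ≥ 1
theorem pvStep_last (A B : Int) (hA : 1 ≤ A) (hB : 1 ≤ B) :
    ∀ E : Int, pvEB A B ≤ pvStep A B E (A + B - 2) := by
  intro E
  unfold pvStep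
  have hL : max 0 ((A + B - 2) - (B - 1)) = A - 1 := by
    rw [max_eq_right]; omega; omega
  have hR : min (A + B - 2) (A - 1) = A - 1 := by
    rw [min_eq_right]; omega
  rw [hL, hR, if_neg (by omega)]
  have hrange : PySem.List.pyRange (A - 1) (A - 1 + 1) 1 = [A - 1] :=
    PySem.List.pyRange_one_singleton _
  rw [hrange]
  simp only [List.foldl]
  have harg : A + B - 2 - (A - 1) = B - 1 := by ring
  rw [harg]
  unfold pvEB
  rw [if_pos ⟨hA, hB⟩]
  have : A + B - 2 + 1 = A + B - 1 := by ring
  rw [this]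
  exact le_max_right _ _

-- when A ≤ 0 or B ≤ 0 every round is skipped
theorem pvStep_id (A B : Int) (h : ¬(1 ≤ A ∧ 1 ≤ B)) :
    ∀ (E k : Int), 0 ≤ k → pvStep A B E k = E := by
  intro E k hk
  unfold pvStep
  rw [if_pos]
  push Not at h
  by_cases hA : 1 ≤ A
  case pos =>
    have hB := h hA
    have := le_max_right 0 (k - (B - 1))
    have := min_le_left k (A - 1)
    omega
  case neg =>
    have := min_le_right k (A - 1)
    have := le_max_left 0 (k - (B - 1))
    omega

theorem pvE_eq (A B : Int) :
    (PySem.List.pyRange 0 (A + B - 1) 1).foldl (pvStep A B) 0 = pvEB A B := by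
  have hmem : ∀ k ∈ PySem.List.pyRange 0 (A + B - 1) 1, (0 : Int) ≤ k := by
    intro k hk
    exact (PySem.List.mem_pyRange_one.mp hk).1
  apply le_antisymm
  · exact pv_foldl_le (pvStep A B) (pvEB A B) _ 0 (pvEB_nonneg A B)
      (fun E k hk hE => pvStep_le A B (pvEB A B) (le_refl _) E k (hmem k hk) hE)
  · by_cases h : 1 ≤ A ∧ 1 ≤ B
    · apply pv_foldl_ge_of_mem (pvStep A B) (pvStep_mono A B) (pvEB A B) (A + B - 2)
        (pvStep_last A B h.1 h.2)
      rw [PySem.List.mem_pyRange_one]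
      omega
    · rw [pv_foldl_id (pvStep A B) _ 0 (fun E k hk => pvStep_id A B h E k (hmem k hk))]
      unfold pvEB
      rw [if_neg h]

-- ===== VERDICT (by name: the statement is the Claim_ definition above) =====
theorem minimo_jogadores_spec : Claim_equal_minimo_jogadores := by
  intro A B _
  unfold Spec_minimo_jogadores minimo_jogadores minimo_jogadores_alt
  have h := pvE_eq A B
  unfold pvEB at h
  simp only []
  rw [show ((PySem.List.pyRange 0 (A + B - 1) 1).foldl (fun E k =>
    let L : Int := max 0 (k - (B - 1))
    let R : Int := min k (A - 1)
    if L > R then E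
    else
      let v2min : Option Int := (PySem.List.pyRange L (R + 1) 1).foldl (fun v2min v =>
        let carries : Int := (PySem.Int.bitCount (PySem.Int.band v (k - v)) : Int)
        match v2min with
        | none => some carries
        | some m => if carries < m then some carries else v2min) none
      match v2min with
      | none => E
      | some m => max E (k + 1 - m)) 0) =
    (PySem.List.pyRange 0 (A + B - 1) 1).foldl (pvStep A B) 0 from rfl, h]
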